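-- pv_equiv track=rewrite | github.com/borh/dm-annotations | src/dm_annotations/io/text_loader.py | _expand_with_parents
-- ===== SOURCE A (Python) =====
-- _CATEGORY_PARENTS: dict[str, set[str]] = {
--     "hypotheses": {"introduction"},
--     "position": {"introduction"},
-- }
--
-- def _expand_with_parents(cats: set[str] | None) -> set[str]:
--     """Return cats unioned with any parent categories (transitively)."""
--     if not cats:
--         return set()
--     out = set(cats)
--     changed = True
--     while changed:
--         changed = False
--         for c in list(out):
--             parents = _CATEGORY_PARENTS.get(c)
--             if parents:
--                 new = parents - out
--                 if new:
--                     out.update(new)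
--                     changed = True
--     return out
-- ===== SOURCE B (Python) =====
-- from collections import deque
--
-- _CATEGORY_PARENTS: dict[str, set[str]] = {
--     "hypotheses": {"introduction"},
--     "position": {"introduction"},
-- }
--
-- def _expand_with_parents(cats: set[str] | None) -> set[str]:
--     """Return cats unioned with any parent categories (transitively)."""
--     if not cats:
--         return set()
--     out = set(cats)
--     work = deque(out)
--     while work:
--         c = work.popleft()
--         for p in _CATEGORY_PARENTS.get(c, ()):
--             if p not in out:
--                 out.add(p)
--                 work.append(p)
--     return out
-- ===== Notes on version B (the rewrite author's own statement) =====
-- stated objective: alternative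
-- what changed: Replaces A's repeat-until-no-change full rescans of the growing set by a single-visit worklist (BFS) closure: each category is dequeued once and only its not-yet-seen parents are added and queued.
import Mathlib
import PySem

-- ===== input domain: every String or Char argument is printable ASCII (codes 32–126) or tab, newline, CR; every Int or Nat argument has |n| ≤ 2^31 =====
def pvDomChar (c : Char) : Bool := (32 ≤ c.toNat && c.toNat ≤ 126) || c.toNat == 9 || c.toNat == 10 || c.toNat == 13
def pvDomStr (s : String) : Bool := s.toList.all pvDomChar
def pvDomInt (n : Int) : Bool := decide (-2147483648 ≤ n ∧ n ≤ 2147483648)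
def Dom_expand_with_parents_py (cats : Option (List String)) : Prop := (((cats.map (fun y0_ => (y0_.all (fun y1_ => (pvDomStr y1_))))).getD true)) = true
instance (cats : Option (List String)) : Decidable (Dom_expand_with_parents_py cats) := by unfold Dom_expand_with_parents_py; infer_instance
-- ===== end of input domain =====

-- B replaces A's repeat-until-no-change rescan of the whole set by a one-visit worklist
-- (BFS) closure: each category is popped once and its unseen parents are queued (objective: alternative).

-- _CATEGORY_PARENTS (shared module constant)
def pvParents : PySem.Dict String (PySem.Set String) :=
  PySem.Dict.ofList [("hypotheses", ["introduction"]), ("position", ["introduction"])]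

-- ===== PORT A =====
-- the body of `for c in list(out)`: state = (out, changed)
def aStep (st : PySem.Set String × Bool) (c : String) : PySem.Set String × Bool :=
  match pvParents.get? c with
  | none => st
  | some parents =>
    if parents = [] then st
    else
      let new := PySem.Set.diff parents st.1
      if new = [] then st else (PySem.Set.update st.1 new, true)

def aPass (snapshot : List String) (st : PySem.Set String × Bool) :
    PySem.Set String × Bool :=
  snapshot.foldl aStep st

-- `while changed:` — fuel is a totality guard only (every pass that resumes the loop grew `out`,
-- and `out` stays inside cats ∪ the dict's values)
def aLoop : Nat → PySem.Set String → PySem.Set String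
  | 0, out => out
  | f + 1, out =>
    let st := aPass out (out, false)
    if st.2 then aLoop f st.1 else st.1

def expand_with_parents_py (cats : Option (List String)) : List String :=
  match cats with
  | none => []
  | some l => if l = [] then [] else aLoop (l.length + 3) (PySem.Set.ofList l)

-- ===== PORT B =====
-- `for p in parents: if p not in out: out.add(p); work.append(p)`: state = (out, newly queued)
def bStep (st : PySem.Set String × List String) (p : String) :
    PySem.Set String × List String :=
  if PySem.Set.contains st.1 p then st else (PySem.Set.add st.1 p, st.2 ++ [p])

-- `while work:` pop from the left; fuel is a totality guard (pops ≤ initial work + elements ever added)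
def bLoop : Nat → PySem.Set String → List String → PySem.Set String
  | 0, out, _ => out
  | _ + 1, out, [] => out
  | f + 1, out, c :: rest =>
    match pvParents.get? c with
    | none => bLoop f out rest
    | some parents =>
      let st := parents.foldl bStep (out, [])
      bLoop f st.1 (rest ++ st.2)

def expand_with_parents_py_alt (cats : Option (List String)) : List String :=
  match cats with
  | none => []
  | some l =>
    if l = [] then []
    else
      let out := PySem.Set.ofList l
      bLoop (l.length + 3) out out

-- ===== PRECONDITION & SPEC =====
def Spec_expand_with_parents_py (cats : Option (List String)) (out : List String) : Prop := out = expand_with_parents_py_alt cats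
instance (cats : Option (List String)) (out : List String) : Decidable (Spec_expand_with_parents_py cats out) := by unfold Spec_expand_with_parents_py; infer_instance

-- ===== CLAIM (what is proved, stated in full; the proofs are below) =====
def Claim_equal_expand_with_parents_py : Prop := ∀ (cats : Option (List String)), Dom_expand_with_parents_py cats → Spec_expand_with_parents_py cats (expand_with_parents_py cats)

-- ===== LEMMAS AND PROOFS =====

lemma get_pvParents (c : String) :
    pvParents.get? c =
      if c = "hypotheses" ∨ c = "position" then some ["introduction"] else none := by
  by_cases h1 : c = "hypotheses"
  · subst h1; decide
  · by_cases h2 : c = "position"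
    · subst h2; decide
    · have : pvParents.get? c = none := by
        simp only [pvParents, PySem.Dict.ofList, PySem.Dict.get?, PySem.Dict.update,
          PySem.Dict.insert, PySem.Dict.empty]
        simp
        exact ⟨fun e => h1 e.symm, fun e => h2 e.symm⟩
      simp [this, h1, h2]

lemma aStep_of_mem (st : PySem.Set String × Bool) (c : String)
    (h : "introduction" ∈ st.1) : aStep st c = st := by
  rw [aStep, get_pvParents]
  by_cases hc : c = "hypotheses" ∨ c = "position"
  · simp [hc, PySem.Set.diff, h]
  · simp [hc]

lemma aStep_trig (out : PySem.Set String) (ch : Bool) (c : String)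
    (hc : c = "hypotheses" ∨ c = "position") (h : "introduction" ∉ out) :
    aStep (out, ch) c = (out ++ ["introduction"], true) := by
  rw [aStep, get_pvParents]
  have hdiff : PySem.Set.diff ["introduction"] out = ["introduction"] := by
    simp [PySem.Set.diff, h]
  have hupd : PySem.Set.update out ["introduction"] = out ++ ["introduction"] := by
    simp [PySem.Set.update, PySem.Set.add_of_not_mem h]
  simp [hc, hdiff, hupd]

lemma aStep_notrig (st : PySem.Set String × Bool) (c : String)
    (hc : ¬ (c = "hypotheses" ∨ c = "position")) : aStep st c = st := by
  rw [aStep, get_pvParents]; simp [hc]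

-- A's inner pass is the identity once "introduction" is already in out
lemma aPass_of_mem (l : List String) (st : PySem.Set String × Bool)
    (h : "introduction" ∈ st.1) : aPass l st = st := by
  induction l with
  | nil => rfl
  | cons c t ih =>
    show aPass t (aStep st c) = st
    rw [aStep_of_mem st c h]; exact ih

-- A's inner pass when "introduction" is absent: it gets added (flag set) iff a trigger occurs
lemma aPass_of_not_mem (l : List String) (out : PySem.Set String) (ch : Bool)
    (h : "introduction" ∉ out) :
    aPass l (out, ch) =
      if ∃ c ∈ l, c = "hypotheses" ∨ c = "position"
      then (out ++ ["introduction"], true) else (out, ch) := by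
  induction l with
  | nil => simp [aPass]
  | cons c t ih =>
    show aPass t (aStep (out, ch) c) = _
    by_cases hc : c = "hypotheses" ∨ c = "position"
    · rw [aStep_trig out ch c hc h, aPass_of_mem t _ (by simp)]
      simp [hc]
    · rw [aStep_notrig _ c hc, ih]
      simp only [List.exists_mem_cons_iff, hc, false_or]

-- characterisation of A's fixpoint loop (two passes always suffice)
lemma aLoop_char (out : PySem.Set String) (f : Nat) (hf : 1 ≤ f) :
    aLoop (f + 1) out =
      if ("introduction" ∉ out) ∧ ∃ c ∈ out, c = "hypotheses" ∨ c = "position"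
      then out ++ ["introduction"] else out := by
  by_cases hm : "introduction" ∈ out
  · have h1 : aPass out (out, false) = (out, false) := aPass_of_mem _ _ hm
    simp [aLoop, h1, hm]
  · rw [show aLoop (f + 1) out = (if (aPass out (out, false)).2
        then aLoop f (aPass out (out, false)).1 else (aPass out (out, false)).1) from rfl]
    rw [aPass_of_not_mem out out false hm]
    by_cases ht : ∃ c ∈ out, c = "hypotheses" ∨ c = "position"
    · simp only [ht, if_pos, hm, not_false_iff, true_and]
      obtain ⟨f', rfl⟩ : ∃ f', f = f' + 1 := ⟨f - 1, by omega⟩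
      have h2 : aPass (out ++ ["introduction"]) (out ++ ["introduction"], false) =
          (out ++ ["introduction"], false) :=
        aPass_of_mem (out ++ ["introduction"]) (out ++ ["introduction"], false) (by simp)
      simp [aLoop, h2]
    · simp [ht, hm]

-- B never changes once "introduction" is in out
lemma bLoop_of_mem (f : Nat) (out : PySem.Set String) (work : List String)
    (h : "introduction" ∈ out) : bLoop f out work = out := by
  induction f generalizing work with
  | zero => rfl
  | succ f ih =>
    cases work with
    | nil => rfl
    | cons c rest =>
      rw [bLoop, get_pvParents]
      by_cases hc : c = "hypotheses" ∨ c = "position"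
      · have hb : bStep (out, []) "introduction" = (out, []) := by
          simp [bStep, h]
        simp only [hc, if_pos, List.foldl_cons, List.foldl_nil, hb, List.append_nil]
        exact ih rest
      · simp only [hc, if_false]
        exact ih rest

-- B's worklist with "introduction" absent: added iff some queued category triggers
lemma bLoop_of_not_mem (work : List String) (f : Nat) (out : PySem.Set String)
    (h : "introduction" ∉ out) (hf : work.length ≤ f) :
    bLoop f out work =
      if ∃ c ∈ work, c = "hypotheses" ∨ c = "position"
      then out ++ ["introduction"] else out := by
  induction work generalizing f with
  | nil => cases f <;> simp [bLoop]
  | cons c rest ih =>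
    obtain ⟨f', rfl⟩ : ∃ f', f = f' + 1 := ⟨f - 1, by simp at hf; omega⟩
    rw [bLoop, get_pvParents]
    by_cases hc : c = "hypotheses" ∨ c = "position"
    · have hb : bStep (out, []) "introduction" =
          (out ++ ["introduction"], ["introduction"]) := by
        simp [bStep, h, PySem.Set.add_of_not_mem h]
      simp only [hc, if_pos, List.foldl_cons, List.foldl_nil, hb]
      rw [bLoop_of_mem f' _ _ (by simp)]
      simp [hc]
    · simp only [hc, if_false]
      rw [ih f' (by simp at hf; omega)]
      simp only [List.exists_mem_cons_iff, hc, false_or]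

-- ===== VERDICT (by name: the statement is the Claim_ definition above) =====
theorem expand_with_parents_py_spec : Claim_equal_expand_with_parents_py := by
  intro cats _
  show expand_with_parents_py cats = expand_with_parents_py_alt cats
  match cats with
  | none => rfl
  | some l =>
    by_cases hl : l = []
    · simp [expand_with_parents_py, expand_with_parents_py_alt, hl]
    · simp only [expand_with_parents_py, expand_with_parents_py_alt, hl, if_false]
      rw [show l.length + 3 = (l.length + 2) + 1 from rfl,
        aLoop_char (PySem.Set.ofList l) (l.length + 2) (by omega)]
      by_cases hm : "introduction" ∈ PySem.Set.ofList l
      · rw [bLoop_of_mem _ _ _ hm]; simp [hm]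
      · rw [bLoop_of_not_mem _ ((l.length + 2) + 1) _ hm
          (le_trans (PySem.Set.length_ofList_le l) (by omega))]
        by_cases ht : ∃ c ∈ PySem.Set.ofList l, c = "hypotheses" ∨ c = "position"
        · simp [ht, hm]
        · simp [ht, hm]
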